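-- pv_equiv track=rewrite | github.com/dstiefe/medsyncai_agentic_backend | app/agents/clinical/ais_clinical_engine/agents/_archive_qa_v2/section_router.py | _prefer_specific
-- ===== SOURCE A (Python) =====
-- from typing import Any, Dict, List, Optional
--
-- def _prefer_specific(sections: List[str]) -> List[str]:
--     """
--     When both parent and child sections match (e.g., 4.7 and 4.7.3),
--     prefer the more specific child.
--     """
--     if len(sections) <= 1:
--         return sections
--
--     to_remove = set()
--     for s1 in sections:
--         for s2 in sections:
--             if s1 != s2 and s2.startswith(s1 + "."):
--                 to_remove.add(s1)
--
--     filtered = [s for s in sections if s not in to_remove]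
--     return filtered if filtered else sections
-- ===== SOURCE B (Python) =====
-- from typing import List
--
-- def _prefer_specific(sections: List[str]) -> List[str]:
--     """
--     When both parent and child sections match (e.g., 4.7 and 4.7.3),
--     prefer the more specific child.
--     """
--     present = set(sections)
--     removed = set()
--     for t in sections:
--         for i, ch in enumerate(t):
--             if ch == "." and t[:i] in present:
--                 removed.add(t[:i])
--     filtered = [s for s in sections if s not in removed]
--     return filtered if filtered else sections
-- ===== Notes on version B (the rewrite author's own statement) =====
-- stated objective: faster
-- what changed: Replaces A's all-pairs nested startswith scan with a hash set of sections plus one membership test per dot position of each section, so the O(n^2) inner loop over other sections disappears.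
import Mathlib
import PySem

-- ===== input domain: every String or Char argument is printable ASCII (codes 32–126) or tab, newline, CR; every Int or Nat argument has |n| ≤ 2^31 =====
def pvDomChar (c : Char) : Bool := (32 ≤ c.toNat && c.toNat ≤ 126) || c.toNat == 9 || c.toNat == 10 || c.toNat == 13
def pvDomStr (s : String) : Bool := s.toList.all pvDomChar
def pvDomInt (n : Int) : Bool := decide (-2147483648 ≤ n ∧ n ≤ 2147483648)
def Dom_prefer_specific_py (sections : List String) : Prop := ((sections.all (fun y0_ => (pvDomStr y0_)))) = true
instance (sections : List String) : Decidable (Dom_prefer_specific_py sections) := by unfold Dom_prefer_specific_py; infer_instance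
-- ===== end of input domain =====

-- B replaces A's O(n²) all-pairs startswith scan by one hash-set membership test per dot
-- position of each section (objective: faster). A = B everywhere (total, no Pre_).

-- ===== PORT A =====
-- literal port of _prefer_specific: nested for-loops collecting parents into a set, then filter
def pvToRemoveA (sections : List String) : PySem.Set String :=
  sections.foldl (fun acc s1 =>
    sections.foldl (fun acc2 s2 =>
      if (s1 != s2) && PySem.Str.startswith s2 (s1 ++ ".") then
        PySem.Set.add acc2 s1
      else acc2) acc) PySem.Set.empty

def prefer_specific_py (sections : List String) : List String :=
  if sections.length ≤ 1 then sections
  else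
    let to_remove := pvToRemoveA sections
    let filtered := sections.filter (fun s => !(PySem.Set.contains to_remove s))
    if filtered.isEmpty then sections else filtered

-- ===== PORT B =====
-- port of Source B: present = set(sections); for each t and each dot position i in t,
-- if t[:i] is present it is a parent — remove it; then the same filter/fallback.
def pvRemovedB (present : PySem.Set String) (sections : List String) : PySem.Set String :=
  sections.foldl (fun acc t =>
    (PySem.List.enumerate t.toList 0).foldl (fun acc2 ic =>
      if (ic.2 == '.') && PySem.Set.contains present (PySem.Str.slice t none (some ic.1)) then
        PySem.Set.add acc2 (PySem.Str.slice t none (some ic.1))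
      else acc2) acc) PySem.Set.empty

def prefer_specific_py_alt (sections : List String) : List String :=
  let present := PySem.Set.ofList sections
  let removed := pvRemovedB present sections
  let filtered := sections.filter (fun s => !(PySem.Set.contains removed s))
  if filtered.isEmpty then sections else filtered

-- ===== PRECONDITION & SPEC =====
def Spec_prefer_specific_py (sections : List String) (out : List String) : Prop := out = prefer_specific_py_alt sections
instance (sections : List String) (out : List String) : Decidable (Spec_prefer_specific_py sections out) := by unfold Spec_prefer_specific_py; infer_instance

-- ===== CLAIM (what is proved, stated in full; the proofs are below) =====
def Claim_equal_prefer_specific_py : Prop := ∀ (sections : List String), Dom_prefer_specific_py sections → Spec_prefer_specific_py sections (prefer_specific_py sections)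

-- ===== LEMMAS AND PROOFS =====

-- membership in a fold whose step adds elements according to a predicate Q
lemma mem_foldl_step {α β : Type} (l : List α) (g : PySem.Set β → α → PySem.Set β)
    (Q : α → β → Prop) (hg : ∀ s x y, y ∈ g s x ↔ y ∈ s ∨ Q x y)
    (init : PySem.Set β) (y : β) :
    y ∈ l.foldl g init ↔ y ∈ init ∨ ∃ x ∈ l, Q x y := by
  induction l generalizing init with
  | nil => simp
  | cons a l ih =>
    simp only [List.foldl_cons, ih, hg, List.mem_cons]
    constructor
    · rintro ((h | h) | ⟨x, hx, hq⟩)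
      · exact Or.inl h
      · exact Or.inr ⟨a, Or.inl rfl, h⟩
      · exact Or.inr ⟨x, Or.inr hx, hq⟩
    · rintro (h | ⟨x, (rfl | hx), hq⟩)
      · exact Or.inl (Or.inl h)
      · exact Or.inl (Or.inr hq)
      · exact Or.inr ⟨x, hx, hq⟩

-- membership in a loop 'if p x: s.add(f x)'
lemma mem_foldl_ite_add {α β : Type} [BEq β] [LawfulBEq β] (l : List α) (p : α → Bool)
    (f : α → β) (init : PySem.Set β) (y : β) :
    y ∈ l.foldl (fun s x => if p x then PySem.Set.add s (f x) else s) init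
      ↔ y ∈ init ∨ ∃ x ∈ l, p x = true ∧ y = f x := by
  apply mem_foldl_step
  intro s x z
  split
  · next h => simp [PySem.Set.mem_add, h]
  · next h => simp [h]

-- the common predicate: y is in sections and some section extends y across a dot
def IsParent (S : List String) (y : String) : Prop :=
  y ∈ S ∧ ∃ t ∈ S, ∃ u : List Char, t.toList = y.toList ++ '.' :: u

lemma mem_to_remove_A (S : List String) (y : String) :
    y ∈ pvToRemoveA S ↔ IsParent S y := by
  unfold pvToRemoveA
  rw [mem_foldl_step (Q := fun s1 y =>
        (∃ s2 ∈ S, ((s1 != s2) && PySem.Str.startswith s2 (s1 ++ ".")) = true) ∧ y = s1)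
      (hg := by
        intro s x z
        rw [mem_foldl_ite_add (f := fun _ => x)]
        constructor
        · rintro (h | ⟨s2, hs2, hp, rfl⟩)
          · exact Or.inl h
          · exact Or.inr ⟨⟨s2, hs2, hp⟩, rfl⟩
        · rintro (h | ⟨⟨s2, hs2, hp⟩, rfl⟩)
          · exact Or.inl h
          · exact Or.inr ⟨s2, hs2, hp, rfl⟩)]
  constructor
  · rintro (h | ⟨s1, hs1, ⟨s2, hs2, hp⟩, rfl⟩)
    · simp [PySem.Set.empty] at h
    · simp only [Bool.and_eq_true, bne_iff_ne, ne_eq] at hp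
      obtain ⟨hne, hsw⟩ := hp
      have := (PySem.Chars.startswith_iff s2.toList (y ++ ".").toList).mp (by simpa using hsw)
      rcases this with ⟨u, hu⟩
      refine ⟨hs1, s2, hs2, u, ?_⟩
      rw [← hu]
      simp [String.toList_append]
  · rintro ⟨hy, t, ht, u, hu⟩
    refine Or.inr ⟨y, hy, ⟨t, ht, ?_⟩, rfl⟩
    simp only [Bool.and_eq_true, bne_iff_ne, ne_eq]
    constructor
    · intro h; subst h
      have := congrArg List.length hu; simp at this
    · simp only [PySem.Str.startswith_eq]
      exact (PySem.Chars.startswith_iff _ _).mpr ⟨u, by simp [String.toList_append, hu]⟩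

lemma mem_removed_B (S : List String) (y : String) :
    y ∈ pvRemovedB (PySem.Set.ofList S) S ↔ IsParent S y := by
  unfold pvRemovedB
  rw [mem_foldl_step (Q := fun t y =>
        ∃ ic ∈ PySem.List.enumerate t.toList 0,
          ((ic.2 == '.') && PySem.Set.contains (PySem.Set.ofList S) (PySem.Str.slice t none (some ic.1))) = true ∧
          y = PySem.Str.slice t none (some ic.1))
      (hg := by
        intro s x z
        exact mem_foldl_ite_add (PySem.List.enumerate x.toList 0)
          (fun ic => (ic.2 == '.') && PySem.Set.contains (PySem.Set.ofList S) (PySem.Str.slice x none (some ic.1)))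
          (fun ic => PySem.Str.slice x none (some ic.1)) s z)]
  constructor
  · rintro (h | ⟨t, ht, ⟨i, ch⟩, hic, hp, rfl⟩)
    · simp [PySem.Set.empty] at h
    · simp only [Bool.and_eq_true, beq_iff_eq, PySem.Set.contains_iff, PySem.Set.mem_ofList] at hp
      obtain ⟨hch, hmem⟩ := hp
      rcases (PySem.List.mem_enumerate_iff _ _ _).mp hic with ⟨k, hk, hpair⟩
      rw [Prod.ext_iff] at hpair
      obtain ⟨hi, hch'⟩ := hpair
      simp only [zero_add] at hi hch'
      subst hi
      have hslice : (PySem.Str.slice t none (some ((k : Nat) : Int))).toList = t.toList.take k := by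
        simp [pysem]
      refine ⟨hmem, t, ht, t.toList.drop (k+1), ?_⟩
      rw [hslice]
      rw [hch] at hch'
      have hsplit : t.toList = t.toList.take k ++ t.toList[k] :: t.toList.drop (k+1) := by
        conv_lhs => rw [← List.take_append_drop k t.toList]
        rw [List.drop_eq_getElem_cons hk]
      rw [← hch'] at hsplit
      exact hsplit
  · rintro ⟨hy, t, ht, u, hu⟩
    have hklt : y.toList.length < t.toList.length := by
      have := congrArg List.length hu
      simp only [List.length_append, List.length_cons] at this
      omega
    have hget : t.toList[y.toList.length]'hklt = '.' := by
      simp [hu]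
    have hslice : (PySem.Str.slice t none (some ((y.toList.length : Nat) : Int))).toList
        = t.toList.take y.toList.length := by
      simp [pysem]
    have htake : t.toList.take y.toList.length = y.toList := by
      rw [hu, List.take_left']
      rfl
    have hsley : PySem.Str.slice t none (some ((y.toList.length : Nat) : Int)) = y :=
      String.toList_inj.mp (by rw [hslice, htake])
    refine Or.inr ⟨t, ht, ⟨((y.toList.length : Nat) : Int), t.toList[y.toList.length]'hklt⟩, ?_, ?_, hsley.symm⟩
    · exact (PySem.List.mem_enumerate_iff _ _ _).mpr ⟨y.toList.length, hklt, by simp⟩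
    · simp only [Bool.and_eq_true, beq_iff_eq, PySem.Set.contains_iff, PySem.Set.mem_ofList]
      exact ⟨hget, by rw [hsley]; exact hy⟩

-- the filtered lists of the two programs are equal for every input
lemma filtered_eq (S : List String) :
    S.filter (fun s => !(PySem.Set.contains (pvToRemoveA S) s))
      = S.filter (fun s => !(PySem.Set.contains (pvRemovedB (PySem.Set.ofList S) S) s)) := by
  apply List.filter_congr
  intro s _
  congr 1
  rw [Bool.eq_iff_iff]
  simp only [PySem.Set.contains_iff]
  rw [mem_to_remove_A, mem_removed_B]

-- a list of at most one section has no parent in it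
lemma isParent_short (S : List String) (y : String) (h : S.length ≤ 1) : ¬ IsParent S y := by
  rintro ⟨hy, t, ht, u, hu⟩
  match S, h with
  | [], _ => exact absurd hy (by simp)
  | [a], _ =>
    simp only [List.mem_singleton] at hy ht
    subst hy; subst ht
    have := congrArg List.length hu
    simp at this

-- ===== VERDICT (by name: the statement is the Claim_ definition above) =====
theorem prefer_specific_py_spec : Claim_equal_prefer_specific_py := by
  intro S _
  show prefer_specific_py S = prefer_specific_py_alt S
  unfold prefer_specific_py prefer_specific_py_alt
  by_cases h : S.length ≤ 1
  · rw [if_pos h]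
    have hfil : S.filter (fun s => !(PySem.Set.contains (pvRemovedB (PySem.Set.ofList S) S) s)) = S := by
      rw [List.filter_eq_self]
      intro a ha
      simp only [Bool.not_eq_eq_eq_not, Bool.not_true]
      rw [Bool.eq_false_iff]
      intro hc
      exact isParent_short S a h ((mem_removed_B S a).mp ((PySem.Set.contains_iff _ _).mp hc))
    simp only [hfil]
    cases S <;> simp
  · rw [if_neg h]
    simp only [filtered_eq]
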